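-- pv_equiv track=rewrite | github.com/strzebon/algorithms-and-datastructures | mix/kolosy/kol2a/esff.py | drivers
-- ===== SOURCE A (Python) =====
-- def f(F, C, o, i):
--     if F[o][i] != -1:
--         return F[o][i]
--     if o == 0: F[o][i] =  min(f(F, C, 1, i+1), f(F, C, 1, i+2), f(F, C, 1, i+3))
--     else: F[o][i] = min(C[i+1]-C[i] + f(F, C, 0, i+1), C[i+2]-C[i] + f(F, C, 0, i+2), C[i+3]-C[i] + f(F, C, 0, i+3))
--     return F[o][i]
--
-- def drivers( P, B ):
--     n = len(P)
--     for i in range(n):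
--         x, w = P[i]
--         if w: P[i] = (x, w, i)
--     P.sort()
--     Z = [-1]
--     C = [0]
--     counter = 0
--     for i in range(n):
--         if P[i][1]:
--             Z.append(P[i][2])
--             C.append(counter)
--         else: counter += 1
--
--     n = len(Z)
--     for _ in range(3): C.append(counter)
--
--     F = [[-1 for i in range(len(C))] for o in range(2)]
--     for o in range(2):
--         for i in range(3):
--             F[o][n+i] = 0
--     f(F,C,0,0)
--     tab = []
--     o = 0
--     i = 0
--
--     while i < n:
--         if o == 0:
--             if F[o][i] == F[1][i+1]:
--                 i += 1
--                 if i < n: tab.append(Z[i])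
--             elif F[o][i] == F[1][i+2]:
--                 i += 2
--                 if i < n: tab.append(Z[i])
--             else:
--                 i += 3
--                 if i < n: tab.append(Z[i])
--             o = 1
--         else:
--             if F[o][i] == C[i+1] - C[i] + F[0][i+1]:
--                 i += 1
--                 if i < n: tab.append(Z[i])
--             elif F[o][i] == C[i+2] - C[i] + F[0][i+2]:
--                 i += 2
--                 if i < n: tab.append(Z[i])
--             else:
--                 i += 3
--                 if i < n: tab.append(Z[i])
--             o = 0
--
--     return tab
-- ===== SOURCE B (Python) =====
-- def drivers(P, B):
--     # Return-value equivalent to A; unlike A, does not mutate P in place.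
--     S = sorted((x, w, i) if w else (x, w) for i, (x, w) in enumerate(P))
--     Z = [-1] + [t[2] for t in S if t[1]]
--     C = [0]
--     pref = 0
--     for t in S:
--         if t[1]:
--             C.append(pref)
--         else:
--             pref += 1
--     C += [pref] * 3
--     n = len(Z)
--     F0 = [0] * (n + 3)
--     F1 = [0] * (n + 3)
--     for i in range(n - 1, -1, -1):
--         F1[i] = min(C[i+1] - C[i] + F0[i+1], C[i+2] - C[i] + F0[i+2], C[i+3] - C[i] + F0[i+3])
--         F0[i] = min(F1[i+1], F1[i+2], F1[i+3])
--     tab = []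
--     o = 0
--     i = 0
--     while i < n:
--         if o == 0:
--             v = F0[i]
--             step = 1 if v == F1[i+1] else 2 if v == F1[i+2] else 3
--         else:
--             v = F1[i]
--             step = 1 if v == C[i+1] - C[i] + F0[i+1] else 2 if v == C[i+2] - C[i] + F0[i+2] else 3
--         i += step
--         o = 1 - o
--         if i < n:
--             tab.append(Z[i])
--     return tab
-- ===== Notes on version B (the rewrite author's own statement) =====
-- stated objective: alternative
-- what changed: Replaces the memoized top-down recursion over a 2xlen(C) memo table with an explicit bottom-up fill of two flat arrays (and a condensed step-based traceback); preprocessing sort and tie-breaking are unchanged, and B does not mutate P in place as A does.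
import Mathlib
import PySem

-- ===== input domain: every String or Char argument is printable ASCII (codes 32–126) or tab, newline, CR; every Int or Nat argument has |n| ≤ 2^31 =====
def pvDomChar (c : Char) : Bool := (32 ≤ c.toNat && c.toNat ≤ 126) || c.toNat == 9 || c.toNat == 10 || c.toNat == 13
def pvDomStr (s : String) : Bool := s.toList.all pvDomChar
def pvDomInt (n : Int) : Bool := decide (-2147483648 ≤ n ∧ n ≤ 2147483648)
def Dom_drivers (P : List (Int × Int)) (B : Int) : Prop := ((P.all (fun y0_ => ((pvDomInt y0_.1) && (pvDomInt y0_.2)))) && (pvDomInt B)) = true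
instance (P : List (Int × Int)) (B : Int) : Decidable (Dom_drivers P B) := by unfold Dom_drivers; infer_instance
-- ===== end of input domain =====

-- B replaces A's memoized top-down recursion by a bottom-up fill of two flat arrays
-- (same sorted preprocessing, same traceback tie order); A mutates P in place, B does not —
-- the equivalence proved here is about the RETURN value only.

-- Shared helpers (the decorate-and-sort preprocessing is the same in both Python versions).
-- Python's min(a, b, c) on ints:
def pvMin3 (a b c : Int) : Int := min (min a b) c
-- 'for i in range(n): x,w = P[i]; if w: P[i] = (x,w,i)' — a 2-tuple (x,w) is encoded as
-- (x, w, -1): exact for the subsequent sort because Python orders (x,w) before (x,w,i)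
-- exactly when a third key -1 would (indices i are ≥ 0).
def pvDec (P : List (Int × Int)) : List (Int × Int × Int) :=
  (PySem.List.enumerate P).map (fun p => if p.2.2 ≠ 0 then (p.2.1, p.2.2, p.1) else (p.2.1, p.2.2, -1))
-- 'P.sort()' on the mixed tuples = lexicographic sort on (x, w, third key); ported as the
-- classic stable two-pass: stable sort by the last key, then stable sort by (x, w) — exact
-- because PySem sorts are stable.
def pvSortP (L : List (Int × Int × Int)) : List (Int × Int × Int) :=
  PySem.List.sorted2 (PySem.List.sorted L (fun t => t.2.2)) (fun t => t.1) (fun t => t.2.1)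

-- ===== PORT A =====
-- F[o][i] (in range when Python runs; -1 default is never hit on Python-reachable reads)
def pvGet2 (F : List (List Int)) (o i : Nat) : Int := (F.getD o []).getD i (-1)
def pvSet2 (F : List (List Int)) (o i : Nat) (v : Int) : List (List Int) :=
  F.set o ((F.getD o []).set i v)

-- the memoized recursion f(F, C, o, i); fuel only makes the recursion structural
-- (fuel = len(C)+1 is enough: i grows by ≥ 1 per call and memo hits stop at i ≥ n)
def pvFA (C : List Int) (fuel : Nat) (F : List (List Int)) (o i : Nat) : List (List Int) × Int :=
  match fuel with
  | 0 => (F, 0)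
  | fuel + 1 =>
    if pvGet2 F o i ≠ -1 then (F, pvGet2 F o i)
    else if o = 0 then
      let r1 := pvFA C fuel F 1 (i+1)
      let r2 := pvFA C fuel r1.1 1 (i+2)
      let r3 := pvFA C fuel r2.1 1 (i+3)
      let m := pvMin3 r1.2 r2.2 r3.2
      (pvSet2 r3.1 o i m, m)
    else
      let r1 := pvFA C fuel F 0 (i+1)
      let r2 := pvFA C fuel r1.1 0 (i+2)
      let r3 := pvFA C fuel r2.1 0 (i+3)
      let m := pvMin3 (C.getD (i+1) 0 - C.getD i 0 + r1.2)
                      (C.getD (i+2) 0 - C.getD i 0 + r2.2)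
                      (C.getD (i+3) 0 - C.getD i 0 + r3.2)
      (pvSet2 r3.1 o i m, m)

-- the 'while i < n' traceback; fuel n+1 is enough since i grows by ≥ 1 per iteration
def pvTbA (Z C : List Int) (F : List (List Int)) (n : Nat) (fuel : Nat) (o i : Nat)
    (tab : List Int) : List Int :=
  match fuel with
  | 0 => tab
  | fuel + 1 =>
    if i < n then
      if o = 0 then
        if pvGet2 F 0 i = pvGet2 F 1 (i+1) then
          pvTbA Z C F n fuel 1 (i+1) (if i+1 < n then tab ++ [Z.getD (i+1) 0] else tab)
        else if pvGet2 F 0 i = pvGet2 F 1 (i+2) then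
          pvTbA Z C F n fuel 1 (i+2) (if i+2 < n then tab ++ [Z.getD (i+2) 0] else tab)
        else
          pvTbA Z C F n fuel 1 (i+3) (if i+3 < n then tab ++ [Z.getD (i+3) 0] else tab)
      else
        if pvGet2 F 1 i = C.getD (i+1) 0 - C.getD i 0 + pvGet2 F 0 (i+1) then
          pvTbA Z C F n fuel 0 (i+1) (if i+1 < n then tab ++ [Z.getD (i+1) 0] else tab)
        else if pvGet2 F 1 i = C.getD (i+2) 0 - C.getD i 0 + pvGet2 F 0 (i+2) then
          pvTbA Z C F n fuel 0 (i+2) (if i+2 < n then tab ++ [Z.getD (i+2) 0] else tab)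
        else
          pvTbA Z C F n fuel 0 (i+3) (if i+3 < n then tab ++ [Z.getD (i+3) 0] else tab)
    else tab

def drivers (P : List (Int × Int)) (B : Int) : List Int :=
  let S := pvSortP (pvDec P)
  let r := S.foldl (fun (s : List Int × List Int × Int) t =>
      if t.2.1 ≠ 0 then (s.1 ++ [t.2.2], s.2.1 ++ [s.2.2], s.2.2)
      else (s.1, s.2.1, s.2.2 + 1)) ([-1], [0], 0)
  let Z := r.1
  let n := Z.length
  let C := r.2.1 ++ [r.2.2, r.2.2, r.2.2]
  let Finit := (List.range 2).foldl (fun F o => (List.range 3).foldl (fun F i => pvSet2 F o (n+i) 0) F)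
      [List.replicate C.length (-1), List.replicate C.length (-1)]
  let F := (pvFA C (C.length + 1) Finit 0 0).1
  pvTbA Z C F n (n+1) 0 0 []

-- ===== PORT B =====
-- one step of B's bottom-up fill (state = the two flat rows (F0, F1))
def pvStepB (C : List Int) (s : List Int × List Int) (i : Nat) : List Int × List Int :=
  let F1 := s.2.set i (pvMin3 (C.getD (i+1) 0 - C.getD i 0 + s.1.getD (i+1) 0)
                              (C.getD (i+2) 0 - C.getD i 0 + s.1.getD (i+2) 0)
                              (C.getD (i+3) 0 - C.getD i 0 + s.1.getD (i+3) 0))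
  (s.1.set i (pvMin3 (F1.getD (i+1) 0) (F1.getD (i+2) 0) (F1.getD (i+3) 0)), F1)

-- B's condensed traceback: compute the step, then advance (same fuel discipline as A's)
def pvTbB (Z C F0 F1 : List Int) (n : Nat) (fuel : Nat) (o i : Nat) (tab : List Int) : List Int :=
  match fuel with
  | 0 => tab
  | fuel + 1 =>
    if i < n then
      let step : Nat :=
        if o = 0 then
          if F0.getD i 0 = F1.getD (i+1) 0 then 1
          else if F0.getD i 0 = F1.getD (i+2) 0 then 2 else 3
        else
          if F1.getD i 0 = C.getD (i+1) 0 - C.getD i 0 + F0.getD (i+1) 0 then 1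
          else if F1.getD i 0 = C.getD (i+2) 0 - C.getD i 0 + F0.getD (i+2) 0 then 2 else 3
      pvTbB Z C F0 F1 n fuel (1 - o) (i + step)
        (if i + step < n then tab ++ [Z.getD (i + step) 0] else tab)
    else tab

def drivers_alt (P : List (Int × Int)) (B : Int) : List Int :=
  let S := pvSortP (pvDec P)
  let Z := -1 :: S.filterMap (fun t => if t.2.1 ≠ 0 then some t.2.2 else none)
  let r := S.foldl (fun (s : List Int × Int) t =>
      if t.2.1 ≠ 0 then (s.1 ++ [s.2], s.2) else (s.1, s.2 + 1)) ([0], 0)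
  let C := r.1 ++ [r.2, r.2, r.2]
  let n := Z.length
  -- 'for i in range(n-1, -1, -1)' enumerates n-1, n-2, …, 0 = (List.range n).reverse (exact)
  let FF := ((List.range n).reverse).foldl (pvStepB C)
      (List.replicate (n+3) 0, List.replicate (n+3) 0)
  pvTbB Z C FF.1 FF.2 n (n+1) 0 0 []

-- ===== PRECONDITION & SPEC =====
def Spec_drivers (P : List (Int × Int)) (B : Int) (out : List Int) : Prop := out = drivers_alt P B
instance (P : List (Int × Int)) (B : Int) (out : List Int) : Decidable (Spec_drivers P B out) := by unfold Spec_drivers; infer_instance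

-- ===== CLAIM (what is proved, stated in full; the proofs are below) =====
def Claim_equal_drivers : Prop := ∀ (P : List (Int × Int)) (B : Int), Dom_drivers P B → Spec_drivers P B (drivers P B)

-- ===== LEMMAS AND PROOFS =====

-- pure characterisations of the Z / C / counter build over the sorted list S
def zsS (S : List (Int × Int × Int)) : List Int :=
  S.filterMap (fun t => if t.2.1 ≠ 0 then some t.2.2 else none)
def csS : List (Int × Int × Int) → Int → List Int
  | [], _ => []
  | t :: ts, k => if t.2.1 ≠ 0 then k :: csS ts k else csS ts (k + 1)
def cntS : List (Int × Int × Int) → Int → Int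
  | [], k => k
  | t :: ts, k => if t.2.1 ≠ 0 then cntS ts k else cntS ts (k + 1)

theorem foldA_zc (S : List (Int × Int × Int)) : ∀ (Z0 C0 : List Int) (k : Int),
    S.foldl (fun (s : List Int × List Int × Int) t =>
      if t.2.1 ≠ 0 then (s.1 ++ [t.2.2], s.2.1 ++ [s.2.2], s.2.2)
      else (s.1, s.2.1, s.2.2 + 1)) (Z0, C0, k)
    = (Z0 ++ zsS S, C0 ++ csS S k, cntS S k) := by
  induction S with
  | nil => intro Z0 C0 k; simp [zsS, csS, cntS]
  | cons t ts ih =>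
    intro Z0 C0 k
    rw [List.foldl_cons]
    by_cases h : t.2.1 ≠ 0
    · rw [if_pos h, ih]
      simp [zsS, csS, cntS, h]
    · rw [if_neg h, ih]
      simp [zsS, csS, cntS, h]

theorem foldB_c (S : List (Int × Int × Int)) : ∀ (C0 : List Int) (k : Int),
    S.foldl (fun (s : List Int × Int) t =>
      if t.2.1 ≠ 0 then (s.1 ++ [s.2], s.2) else (s.1, s.2 + 1)) (C0, k)
    = (C0 ++ csS S k, cntS S k) := by
  induction S with
  | nil => intro C0 k; simp [csS, cntS]
  | cons t ts ih =>
    intro C0 k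
    rw [List.foldl_cons]
    by_cases h : t.2.1 ≠ 0
    · rw [if_pos h, ih]; simp [csS, cntS, h]
    · rw [if_neg h, ih]; simp [csS, cntS, h]

theorem len_cs (S : List (Int × Int × Int)) : ∀ k, (csS S k).length = (zsS S).length := by
  induction S with
  | nil => intro k; simp [csS, zsS]
  | cons t ts ih =>
    intro k
    by_cases h : t.2.1 ≠ 0 <;> simp [csS, zsS, h, ih]

theorem cs_chain (S : List (Int × Int × Int)) : ∀ k : Int,
    List.IsChain (· ≤ ·) (k :: (csS S k ++ [cntS S k, cntS S k, cntS S k])) := by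
  induction S with
  | nil => intro k; simp [csS, cntS, List.isChain_cons_cons]
  | cons t ts ih =>
    intro k
    by_cases h : t.2.1 ≠ 0
    · have : csS (t :: ts) k = k :: csS ts k := by simp [csS, h]
      have : cntS (t :: ts) k = cntS ts k := by simp [cntS, h]
      simp only [‹csS (t :: ts) k = _›, ‹cntS (t :: ts) k = _›, List.cons_append,
        List.isChain_cons_cons]
      exact ⟨le_refl k, ih k⟩
    · have e1 : csS (t :: ts) k = csS ts (k + 1) := by simp [csS, h]
      have e2 : cntS (t :: ts) k = cntS ts (k + 1) := by simp [cntS, h]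
      have h2 := ih (k + 1)
      rw [e1, e2]
      rcases h3 : (csS ts (k+1) ++ [cntS ts (k+1), cntS ts (k+1), cntS ts (k+1)]) with _ | ⟨a, l⟩
      · simp
      · rw [h3] at h2
        rw [List.isChain_cons_cons] at h2 ⊢
        exact ⟨by linarith [h2.1], h2.2⟩

-- the DP value function both tables compute
def gdp (C : List Int) (n : Nat) (o i : Nat) : Int :=
  if n ≤ i then 0
  else if o = 0 then pvMin3 (gdp C n 1 (i+1)) (gdp C n 1 (i+2)) (gdp C n 1 (i+3))
  else pvMin3 (C.getD (i+1) 0 - C.getD i 0 + gdp C n 0 (i+1))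
              (C.getD (i+2) 0 - C.getD i 0 + gdp C n 0 (i+2))
              (C.getD (i+3) 0 - C.getD i 0 + gdp C n 0 (i+3))
  termination_by n - i
  decreasing_by all_goals omega

theorem gdp_base {C n o i} (h : n ≤ i) : gdp C n o i = 0 := by rw [gdp]; simp [h]
theorem gdp_zero {C n i} (h : i < n) :
    gdp C n 0 i = pvMin3 (gdp C n 1 (i+1)) (gdp C n 1 (i+2)) (gdp C n 1 (i+3)) := by
  rw [gdp]; simp [Nat.not_le.mpr h]
theorem gdp_one {C n i o} (h : i < n) (ho : o ≠ 0) :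
    gdp C n o i = pvMin3 (C.getD (i+1) 0 - C.getD i 0 + gdp C n 0 (i+1))
                         (C.getD (i+2) 0 - C.getD i 0 + gdp C n 0 (i+2))
                         (C.getD (i+3) 0 - C.getD i 0 + gdp C n 0 (i+3)) := by
  rw [gdp]; simp [Nat.not_le.mpr h, ho]

theorem pvMin3_nonneg {a b c : Int} (ha : 0 ≤ a) (hb : 0 ≤ b) (hc : 0 ≤ c) :
    0 ≤ pvMin3 a b c := by
  simp [pvMin3]; omega

theorem chain_getD_le {C : List Int} (h : List.IsChain (· ≤ ·) C) {i : Nat}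
    (hi : i + 1 < C.length) : C.getD i 0 ≤ C.getD (i+1) 0 := by
  have h2 := List.isChain_iff_getElem.mp h i hi
  rw [List.getD_eq_getElem?_getD, List.getD_eq_getElem?_getD,
    List.getElem?_eq_getElem (by omega), List.getElem?_eq_getElem hi]
  simpa using h2

theorem gdp_nonneg {C : List Int} {n : Nat} (hlen : C.length = n + 3)
    (hch : List.IsChain (· ≤ ·) C) : ∀ o i, 0 ≤ gdp C n o i := by
  have key : ∀ m o i, n - i ≤ m → 0 ≤ gdp C n o i := by
    intro m
    induction m with
    | zero => intro o i h; rw [gdp_base (by omega)]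
    | succ m ih =>
      intro o i h
      by_cases hi : n ≤ i
      · rw [gdp_base hi]
      · have hlt : i < n := by omega
        by_cases ho : o = 0
        · subst ho; rw [gdp_zero hlt]
          exact pvMin3_nonneg (ih 1 (i+1) (by omega)) (ih 1 (i+2) (by omega))
            (ih 1 (i+3) (by omega))
        · rw [gdp_one hlt ho]
          have d1 : C.getD i 0 ≤ C.getD (i+1) 0 := chain_getD_le hch (by omega)
          have d2 : C.getD (i+1) 0 ≤ C.getD (i+2) 0 := chain_getD_le hch (by omega)
          have d3 : C.getD (i+2) 0 ≤ C.getD (i+3) 0 := chain_getD_le hch (by omega)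
          have := ih 0 (i+1) (by omega)
          have := ih 0 (i+2) (by omega)
          have := ih 0 (i+3) (by omega)
          exact pvMin3_nonneg (by omega) (by omega) (by omega)
  intro o i
  exact key n o i (by omega)

-- lemmas about the 2-row table
theorem getD_set_self_row {F : List (List Int)} {o : Nat} {r : List Int} (h : o < F.length) :
    (F.set o r).getD o [] = r := by
  rw [List.getD_eq_getElem?_getD, List.getElem?_set_self h]; rfl

theorem getD_set_ne_row {F : List (List Int)} {o o' : Nat} {r : List Int} (h : o' ≠ o) :
    (F.set o r).getD o' [] = F.getD o' [] := by
  rw [List.getD_eq_getElem?_getD, List.getElem?_set_ne (fun he => h he.symm),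
    ← List.getD_eq_getElem?_getD]

theorem get2_set2_self {F : List (List Int)} {o i : Nat} {v : Int}
    (ho : o < F.length) (hi : i < (F.getD o []).length) :
    pvGet2 (pvSet2 F o i v) o i = v := by
  unfold pvGet2 pvSet2
  rw [getD_set_self_row ho, List.getD_eq_getElem?_getD, List.getElem?_set_self hi]; rfl

theorem get2_set2_other {F : List (List Int)} {o i o' i' : Nat} {v : Int}
    (h : o' ≠ o ∨ i' ≠ i) : pvGet2 (pvSet2 F o i v) o' i' = pvGet2 F o' i' := by
  unfold pvGet2 pvSet2
  by_cases ho : o' = o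
  · subst ho
    have hi : i' ≠ i := by tauto
    by_cases hor : o' < F.length
    · rw [getD_set_self_row hor, List.getD_eq_getElem?_getD,
        List.getElem?_set_ne (fun he => hi he.symm), ← List.getD_eq_getElem?_getD]
    · rw [List.set_eq_of_length_le (by omega)]
  · rw [getD_set_ne_row ho]

theorem set2_length {F : List (List Int)} {o i : Nat} {v : Int} :
    (pvSet2 F o i v).length = F.length := by
  simp [pvSet2]

theorem set2_row_length {F : List (List Int)} {o i : Nat} {v : Int} (o' : Nat) :
    ((pvSet2 F o i v).getD o' []).length = (F.getD o' []).length := by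
  unfold pvSet2
  by_cases h : o' = o
  · subst h
    by_cases ho : o' < F.length
    · rw [getD_set_self_row ho]; simp
    · rw [List.set_eq_of_length_le (by omega)]
  · rw [getD_set_ne_row h]

-- the memo-table invariant
def InvF (C : List Int) (n : Nat) (F : List (List Int)) : Prop :=
  F.length = 2 ∧
  (∀ o, o < 2 → (F.getD o []).length = n + 3) ∧
  (∀ o i, o < 2 → i < n + 3 → pvGet2 F o i = -1 ∨ pvGet2 F o i = gdp C n o i) ∧
  (∀ o i, o < 2 → n ≤ i → i < n + 3 → pvGet2 F o i = gdp C n o i) ∧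
  (∀ o i, o < 2 → i < n → pvGet2 F o i ≠ -1 →
    pvGet2 F (1-o) (i+1) ≠ -1 ∧ pvGet2 F (1-o) (i+2) ≠ -1 ∧ pvGet2 F (1-o) (i+3) ≠ -1)

theorem getD_set_self_int {l : List Int} {i : Nat} {v : Int} (h : i < l.length) :
    (l.set i v).getD i 0 = v := by
  rw [List.getD_eq_getElem?_getD, List.getElem?_set_self h]; rfl

theorem getD_set_ne_int {l : List Int} {i j : Nat} {v : Int} (h : j ≠ i) :
    (l.set i v).getD j 0 = l.getD j 0 := by
  rw [List.getD_eq_getElem?_getD, List.getElem?_set_ne (fun he => h he.symm),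
    ← List.getD_eq_getElem?_getD]

theorem InvF_set {C : List Int} {n : Nat} (hg : ∀ o i, 0 ≤ gdp C n o i)
    {F : List (List Int)} {o i : Nat} (hInv : InvF C n F) (ho : o < 2) (hi : i < n)
    (hc1 : pvGet2 F (1-o) (i+1) ≠ -1) (hc2 : pvGet2 F (1-o) (i+2) ≠ -1)
    (hc3 : pvGet2 F (1-o) (i+3) ≠ -1) :
    InvF C n (pvSet2 F o i (gdp C n o i)) := by
  obtain ⟨hF2, hrow, hval, hbase, hclo⟩ := hInv
  have hoF : o < F.length := by omega
  have hiF : i < (F.getD o []).length := by rw [hrow o ho]; omega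
  have keep : ∀ a b, pvGet2 F a b ≠ -1 → pvGet2 (pvSet2 F o i (gdp C n o i)) a b ≠ -1 := by
    intro a b hab
    by_cases hx : a = o ∧ b = i
    · obtain ⟨rfl, rfl⟩ := hx; rw [get2_set2_self hoF hiF]; have := hg a b; omega
    · rw [get2_set2_other (by tauto)]; exact hab
  refine ⟨by rw [set2_length]; exact hF2,
    fun o' ho' => by rw [set2_row_length]; exact hrow o' ho', ?_, ?_, ?_⟩
  · intro o' i' ho' hi'
    by_cases he : o' = o ∧ i' = i
    · obtain ⟨rfl, rfl⟩ := he; right; rw [get2_set2_self hoF hiF]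
    · rw [get2_set2_other (by tauto)]; exact hval o' i' ho' hi'
  · intro o' i' ho' hni hi'
    have he : ¬(o' = o ∧ i' = i) := by rintro ⟨rfl, rfl⟩; omega
    rw [get2_set2_other (by tauto)]; exact hbase o' i' ho' hni hi'
  · intro o' i' ho' hii hne
    by_cases he : o' = o ∧ i' = i
    · obtain ⟨rfl, rfl⟩ := he
      exact ⟨keep _ _ hc1, keep _ _ hc2, keep _ _ hc3⟩
    · have hne' : pvGet2 F o' i' ≠ -1 := by
        rw [get2_set2_other (by tauto)] at hne; exact hne
      obtain ⟨d1, d2, d3⟩ := hclo o' i' ho' hii hne'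
      exact ⟨keep _ _ d1, keep _ _ d2, keep _ _ d3⟩

theorem fA_spec {C : List Int} {n : Nat} (hlen : C.length = n + 3)
    (hg : ∀ o i, 0 ≤ gdp C n o i) :
    ∀ (fuel : Nat) (F : List (List Int)) (o i : Nat), InvF C n F → o < 2 → i < n + 3 →
      n + 3 ≤ fuel + i →
      InvF C n (pvFA C fuel F o i).1 ∧ (pvFA C fuel F o i).2 = gdp C n o i ∧
      pvGet2 (pvFA C fuel F o i).1 o i = gdp C n o i ∧
      (∀ o' i', pvGet2 F o' i' ≠ -1 → pvGet2 (pvFA C fuel F o i).1 o' i' = pvGet2 F o' i') := by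
  intro fuel
  induction fuel with
  | zero => intro F o i _ _ hi hfu; omega
  | succ fuel ih =>
    intro F o i hInv ho hi hfu
    by_cases hmem : pvGet2 F o i = -1
    · -- memo miss
      have hin : i < n := by
        by_contra hni
        have := hInv.2.2.2.1 o i ho (by omega) hi
        have := hg o i
        omega
      rw [pvFA]
      rw [if_neg (by simpa using hmem)]
      by_cases ho0 : o = 0
      · subst ho0
        rw [if_pos rfl]
        obtain ⟨Inv1, v1, c1, p1⟩ := ih F 1 (i+1) hInv (by omega) (by omega) (by omega)
        obtain ⟨Inv2, v2, c2, p2⟩ :=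
          ih (pvFA C fuel F 1 (i+1)).1 1 (i+2) Inv1 (by omega) (by omega) (by omega)
        obtain ⟨Inv3, v3, c3, p3⟩ :=
          ih (pvFA C fuel (pvFA C fuel F 1 (i+1)).1 1 (i+2)).1 1 (i+3) Inv2
            (by omega) (by omega) (by omega)
        simp only []
        set F1t := (pvFA C fuel F 1 (i+1)).1 with hF1t
        set F2t := (pvFA C fuel F1t 1 (i+2)).1 with hF2t
        set F3t := (pvFA C fuel F2t 1 (i+3)).1 with hF3t
        have hgne : ∀ o' i', gdp C n o' i' ≠ -1 := fun o' i' => by have := hg o' i'; omega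
        have hc1 : pvGet2 F3t 1 (i+1) ≠ -1 := by
          rw [p3 1 (i+1) (by rw [p2 1 (i+1) (by rw [c1]; exact hgne _ _)]; rw [c1]; exact hgne _ _)]
          rw [p2 1 (i+1) (by rw [c1]; exact hgne _ _), c1]; exact hgne _ _
        have hc2 : pvGet2 F3t 1 (i+2) ≠ -1 := by
          rw [p3 1 (i+2) (by rw [c2]; exact hgne _ _), c2]; exact hgne _ _
        have hc3 : pvGet2 F3t 1 (i+3) ≠ -1 := c3 ▸ hgne _ _
        have hm : pvMin3 (pvFA C fuel F 1 (i+1)).2 (pvFA C fuel F1t 1 (i+2)).2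
            (pvFA C fuel F2t 1 (i+3)).2 = gdp C n 0 i := by
          rw [v1, v2, v3, gdp_zero hin]
        have hInv4 : InvF C n (pvSet2 F3t 0 i (gdp C n 0 i)) := by
          have := InvF_set hg Inv3 (by omega) hin (by simpa using hc1) (by simpa using hc2)
            (by simpa using hc3)
          simpa using this
        refine ⟨by rw [hm]; exact hInv4, hm, ?_, ?_⟩
        · rw [hm]
          rw [get2_set2_self (by rw [Inv3.1]; omega) (by rw [Inv3.2.1 0 (by omega)]; omega)]
        · intro o' i' hne
          rw [hm]
          have e1 : pvGet2 F1t o' i' = pvGet2 F o' i' := p1 o' i' hne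
          have e2 : pvGet2 F2t o' i' = pvGet2 F o' i' := by
            rw [p2 o' i' (by rw [e1]; exact hne), e1]
          have e3 : pvGet2 F3t o' i' = pvGet2 F o' i' := by
            rw [p3 o' i' (by rw [e2]; exact hne), e2]
          have hneq : ¬(o' = 0 ∧ i' = i) := by
            rintro ⟨rfl, rfl⟩; exact hne hmem
          rw [get2_set2_other (by tauto), e3]
      · rw [if_neg ho0]
        have ho1 : o = 1 := by omega
        subst ho1
        obtain ⟨Inv1, v1, c1, p1⟩ := ih F 0 (i+1) hInv (by omega) (by omega) (by omega)
        obtain ⟨Inv2, v2, c2, p2⟩ :=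
          ih (pvFA C fuel F 0 (i+1)).1 0 (i+2) Inv1 (by omega) (by omega) (by omega)
        obtain ⟨Inv3, v3, c3, p3⟩ :=
          ih (pvFA C fuel (pvFA C fuel F 0 (i+1)).1 0 (i+2)).1 0 (i+3) Inv2
            (by omega) (by omega) (by omega)
        simp only []
        set F1t := (pvFA C fuel F 0 (i+1)).1 with hF1t
        set F2t := (pvFA C fuel F1t 0 (i+2)).1 with hF2t
        set F3t := (pvFA C fuel F2t 0 (i+3)).1 with hF3t
        have hgne : ∀ o' i', gdp C n o' i' ≠ -1 := fun o' i' => by have := hg o' i'; omega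
        have hc1 : pvGet2 F3t 0 (i+1) ≠ -1 := by
          rw [p3 0 (i+1) (by rw [p2 0 (i+1) (by rw [c1]; exact hgne _ _)]; rw [c1]; exact hgne _ _)]
          rw [p2 0 (i+1) (by rw [c1]; exact hgne _ _), c1]; exact hgne _ _
        have hc2 : pvGet2 F3t 0 (i+2) ≠ -1 := by
          rw [p3 0 (i+2) (by rw [c2]; exact hgne _ _), c2]; exact hgne _ _
        have hc3 : pvGet2 F3t 0 (i+3) ≠ -1 := c3 ▸ hgne _ _
        have hm : pvMin3 (C.getD (i+1) 0 - C.getD i 0 + (pvFA C fuel F 0 (i+1)).2)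
            (C.getD (i+2) 0 - C.getD i 0 + (pvFA C fuel F1t 0 (i+2)).2)
            (C.getD (i+3) 0 - C.getD i 0 + (pvFA C fuel F2t 0 (i+3)).2) = gdp C n 1 i := by
          rw [v1, v2, v3, gdp_one hin (by omega)]
        have hInv4 : InvF C n (pvSet2 F3t 1 i (gdp C n 1 i)) := by
          have := InvF_set hg Inv3 (by omega) hin (by simpa using hc1) (by simpa using hc2)
            (by simpa using hc3)
          simpa using this
        refine ⟨by rw [hm]; exact hInv4, hm, ?_, ?_⟩
        · rw [hm]
          rw [get2_set2_self (by rw [Inv3.1]; omega) (by rw [Inv3.2.1 1 (by omega)]; omega)]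
        · intro o' i' hne
          rw [hm]
          have e1 : pvGet2 F1t o' i' = pvGet2 F o' i' := p1 o' i' hne
          have e2 : pvGet2 F2t o' i' = pvGet2 F o' i' := by
            rw [p2 o' i' (by rw [e1]; exact hne), e1]
          have e3 : pvGet2 F3t o' i' = pvGet2 F o' i' := by
            rw [p3 o' i' (by rw [e2]; exact hne), e2]
          have hneq : ¬(o' = 1 ∧ i' = i) := by
            rintro ⟨rfl, rfl⟩; exact hne hmem
          rw [get2_set2_other (by tauto), e3]
    · -- memo hit
      rw [pvFA]
      rw [if_pos hmem]
      have hv : pvGet2 F o i = gdp C n o i := by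
        rcases hInv.2.2.1 o i ho hi with h | h
        · exact absurd h hmem
        · exact h
      exact ⟨hInv, hv, hv, fun o' i' _ => rfl⟩

theorem fillB_spec {C : List Int} {n : Nat} (hg : ∀ o i, 0 ≤ gdp C n o i) :
    ∀ (m : Nat), m ≤ n → ∀ (F0 F1 : List Int), F0.length = n + 3 → F1.length = n + 3 →
      (∀ i, m ≤ i → i < n + 3 → F0.getD i 0 = gdp C n 0 i ∧ F1.getD i 0 = gdp C n 1 i) →
      (((List.range m).reverse.foldl (pvStepB C) (F0, F1)).1.length = n + 3 ∧
       ((List.range m).reverse.foldl (pvStepB C) (F0, F1)).2.length = n + 3 ∧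
       ∀ i, i < n + 3 →
         ((List.range m).reverse.foldl (pvStepB C) (F0, F1)).1.getD i 0 = gdp C n 0 i ∧
         ((List.range m).reverse.foldl (pvStepB C) (F0, F1)).2.getD i 0 = gdp C n 1 i) := by
  intro m
  induction m with
  | zero =>
    intro _ F0 F1 h0 h1 hprop
    simp only [List.range_zero, List.reverse_nil, List.foldl_nil]
    exact ⟨h0, h1, fun i hi => hprop i (by omega) hi⟩
  | succ m ih =>
    intro hm F0 F1 h0 h1 hprop
    have hmn : m < n := by omega
    rw [List.range_succ, List.reverse_append]
    simp only [List.reverse_singleton, List.singleton_append, List.foldl_cons]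
    have hstep : pvStepB C (F0, F1) m =
        (F0.set m (pvMin3 ((F1.set m (pvMin3 (C.getD (m+1) 0 - C.getD m 0 + F0.getD (m+1) 0)
            (C.getD (m+2) 0 - C.getD m 0 + F0.getD (m+2) 0)
            (C.getD (m+3) 0 - C.getD m 0 + F0.getD (m+3) 0))).getD (m+1) 0)
          ((F1.set m _).getD (m+2) 0) ((F1.set m _).getD (m+3) 0)),
         F1.set m (pvMin3 (C.getD (m+1) 0 - C.getD m 0 + F0.getD (m+1) 0)
            (C.getD (m+2) 0 - C.getD m 0 + F0.getD (m+2) 0)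
            (C.getD (m+3) 0 - C.getD m 0 + F0.getD (m+3) 0))) := rfl
    rw [hstep]
    apply ih (by omega)
    · simp [h0]
    · simp [h1]
    · intro i hmi hi
      have hv1 : (F1.set m (pvMin3 (C.getD (m+1) 0 - C.getD m 0 + F0.getD (m+1) 0)
            (C.getD (m+2) 0 - C.getD m 0 + F0.getD (m+2) 0)
            (C.getD (m+3) 0 - C.getD m 0 + F0.getD (m+3) 0))).getD m 0 = gdp C n 1 m := by
        rw [getD_set_self_int (by omega), gdp_one hmn (by omega)]
        rw [(hprop (m+1) (by omega) (by omega)).1, (hprop (m+2) (by omega) (by omega)).1,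
          (hprop (m+3) (by omega) (by omega)).1]
      by_cases hieq : i = m
      · subst hieq
        constructor
        · rw [getD_set_self_int (by omega)]
          rw [getD_set_ne_int (by omega), getD_set_ne_int (by omega),
            getD_set_ne_int (by omega)]
          rw [(hprop (i+1) (by omega) (by omega)).2, (hprop (i+2) (by omega) (by omega)).2,
            (hprop (i+3) (by omega) (by omega)).2, gdp_zero hmn]
        · exact hv1
      · constructor
        · rw [getD_set_ne_int (by omega)]; exact (hprop i (by omega) hi).1
        · rw [getD_set_ne_int (by omega)]; exact (hprop i (by omega) hi).2

theorem tb_eq {C : List Int} {n : Nat} (Z : List Int) (hg : ∀ o i, 0 ≤ gdp C n o i)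
    {F : List (List Int)} {F0 F1 : List Int} (hInv : InvF C n F)
    (hB : ∀ i, i < n + 3 → F0.getD i 0 = gdp C n 0 i ∧ F1.getD i 0 = gdp C n 1 i) :
    ∀ (fuel : Nat) (o i : Nat) (tab : List Int), o < 2 → (i < n → pvGet2 F o i ≠ -1) →
      pvTbA Z C F n fuel o i tab = pvTbB Z C F0 F1 n fuel o i tab := by
  intro fuel
  induction fuel with
  | zero => intro o i tab _ _; rw [pvTbA, pvTbB]
  | succ fuel ih =>
    intro o i tab ho hcomp
    rw [pvTbA, pvTbB]
    by_cases hin : i < n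
    · rw [if_pos hin, if_pos hin]
      have hcur : pvGet2 F o i ≠ -1 := hcomp hin
      obtain ⟨hF2, hrow, hval, hbase, hclo⟩ := hInv
      have hgcur : pvGet2 F o i = gdp C n o i := by
        rcases hval o i ho (by omega) with h | h
        · exact absurd h hcur
        · exact h
      obtain ⟨d1, d2, d3⟩ := hclo o i ho hin hcur
      have gd : ∀ k, pvGet2 F (1-o) (i+k) ≠ -1 → k ≤ 3 →
          pvGet2 F (1-o) (i+k) = gdp C n (1-o) (i+k) := by
        intro k hk hk3
        rcases hval (1-o) (i+k) (by omega) (by omega) with h | h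
        · exact absurd h hk
        · exact h
      by_cases ho0 : o = 0
      · subst ho0
        rw [if_pos rfl]
        simp only [reduceIte]
        have e1 : pvGet2 F 1 (i+1) = gdp C n 1 (i+1) := by simpa using gd 1 d1 (by omega)
        have e2 : pvGet2 F 1 (i+2) = gdp C n 1 (i+2) := by simpa using gd 2 d2 (by omega)
        have b0 : F0.getD i 0 = gdp C n 0 i := (hB i (by omega)).1
        have b1 : F1.getD (i+1) 0 = gdp C n 1 (i+1) := (hB (i+1) (by omega)).2
        have b2 : F1.getD (i+2) 0 = gdp C n 1 (i+2) := (hB (i+2) (by omega)).2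
        rw [hgcur, e1, e2, b0, b1, b2]
        by_cases hc1 : gdp C n 0 i = gdp C n 1 (i+1)
        · rw [if_pos hc1, if_pos hc1]
          exact ih 1 (i+1) _ (by omega) (fun _ => by simpa using d1)
        · rw [if_neg hc1, if_neg hc1]
          by_cases hc2 : gdp C n 0 i = gdp C n 1 (i+2)
          · rw [if_pos hc2, if_pos hc2]
            exact ih 1 (i+2) _ (by omega) (fun _ => by simpa using d2)
          · rw [if_neg hc2, if_neg hc2]
            exact ih 1 (i+3) _ (by omega) (fun _ => by simpa using d3)
      · have ho1 : o = 1 := by omega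
        subst ho1
        rw [if_neg (by omega)]
        simp only [if_neg (show ¬(1 = 0) by omega)]
        have e1 : pvGet2 F 0 (i+1) = gdp C n 0 (i+1) := by simpa using gd 1 d1 (by omega)
        have e2 : pvGet2 F 0 (i+2) = gdp C n 0 (i+2) := by simpa using gd 2 d2 (by omega)
        have b0 : F1.getD i 0 = gdp C n 1 i := (hB i (by omega)).2
        have b1 : F0.getD (i+1) 0 = gdp C n 0 (i+1) := (hB (i+1) (by omega)).1
        have b2 : F0.getD (i+2) 0 = gdp C n 0 (i+2) := (hB (i+2) (by omega)).1
        rw [hgcur, e1, e2, b0, b1, b2]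
        by_cases hc1 : gdp C n 1 i = C.getD (i+1) 0 - C.getD i 0 + gdp C n 0 (i+1)
        · rw [if_pos hc1, if_pos hc1]
          have := ih 0 (i+1) (if i + 1 < n then tab ++ [Z.getD (i+1) 0] else tab) (by omega)
            (fun _ => by simpa using d1)
          simpa using this
        · rw [if_neg hc1, if_neg hc1]
          by_cases hc2 : gdp C n 1 i = C.getD (i+2) 0 - C.getD i 0 + gdp C n 0 (i+2)
          · rw [if_pos hc2, if_pos hc2]
            have := ih 0 (i+2) (if i + 2 < n then tab ++ [Z.getD (i+2) 0] else tab) (by omega)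
              (fun _ => by simpa using d2)
            simpa using this
          · rw [if_neg hc2, if_neg hc2]
            have := ih 0 (i+3) (if i + 3 < n then tab ++ [Z.getD (i+3) 0] else tab) (by omega)
              (fun _ => by simpa using d3)
            simpa using this
    · rw [if_neg hin, if_neg hin]

theorem get2_set2_full {F : List (List Int)} {o i a b : Nat} {v : Int} :
    pvGet2 (pvSet2 F a b v) o i =
      if o = a ∧ i = b ∧ a < F.length ∧ b < (F.getD a []).length then v
      else pvGet2 F o i := by
  split_ifs with h
  · obtain ⟨rfl, rfl, h3, h4⟩ := h; exact get2_set2_self h3 h4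
  · by_cases ho : o = a
    · subst ho
      by_cases hi2 : i = b
      · subst hi2
        by_cases hA : o < F.length
        · have hb : ¬ i < (F.getD o []).length := by tauto
          unfold pvGet2 pvSet2
          rw [getD_set_self_row hA, List.set_eq_of_length_le (by omega)]
        · unfold pvSet2
          rw [List.set_eq_of_length_le (by omega)]
      · exact get2_set2_other (Or.inr hi2)
    · exact get2_set2_other (Or.inl ho)

theorem init_get {C : List Int} {n : Nat} (hlen : C.length = n + 3) (o i : Nat)
    (ho : o < 2) (hi : i < n + 3) :
    pvGet2 ((List.range 2).foldl
        (fun F o => (List.range 3).foldl (fun F i => pvSet2 F o (n+i) 0) F)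
        [List.replicate C.length (-1), List.replicate C.length (-1)]) o i
      = if n ≤ i then 0 else -1 := by
  have hred : (List.range 2).foldl
        (fun F o => (List.range 3).foldl (fun F i => pvSet2 F o (n+i) 0) F)
        [List.replicate C.length (-1), List.replicate C.length (-1)]
      = pvSet2 (pvSet2 (pvSet2 (pvSet2 (pvSet2 (pvSet2
          [List.replicate C.length (-1), List.replicate C.length (-1)]
          0 (n+0) 0) 0 (n+1) 0) 0 (n+2) 0) 1 (n+0) 0) 1 (n+1) 0) 1 (n+2) 0 := by
    rfl
  rw [hred]
  simp only [get2_set2_full, set2_length, set2_row_length, List.length_cons,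
    List.length_nil, List.length_replicate, hlen]
  have g0 : ([List.replicate (n+3) (-1:Int), List.replicate (n+3) (-1)].getD 0 []) =
      List.replicate (n+3) (-1) := rfl
  have g1 : ([List.replicate (n+3) (-1:Int), List.replicate (n+3) (-1)].getD 1 []) =
      List.replicate (n+3) (-1) := rfl
  have grep : ∀ j, pvGet2 [List.replicate (n+3) (-1:Int), List.replicate (n+3) (-1)] o j
      = -1 := by
    intro j
    unfold pvGet2
    have : ([List.replicate (n+3) (-1:Int), List.replicate (n+3) (-1)].getD o []) =
        List.replicate (n+3) (-1) := by
      interval_cases o <;> rfl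
    rw [this]
    rcases Nat.lt_or_ge j (n+3) with hj | hj
    · rw [List.getD_eq_getElem?_getD, List.getElem?_replicate]; simp [hj]
    · rw [List.getD_eq_getElem?_getD, List.getElem?_eq_none_iff.mpr (by simpa using hj)]; rfl
  rw [g0, g1]
  simp only [List.length_replicate]
  split_ifs with h1 h2 h3 h4 h5 h6 h7 <;>
    first
      | rfl
      | (exact grep _)
      | (exfalso; omega)

theorem init_inv {C : List Int} {n : Nat} (hlen : C.length = n + 3) :
    InvF C n ((List.range 2).foldl
        (fun F o => (List.range 3).foldl (fun F i => pvSet2 F o (n+i) 0) F)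
        [List.replicate C.length (-1), List.replicate C.length (-1)]) := by
  refine ⟨?_, ?_, ?_, ?_, ?_⟩
  · show (pvSet2 (pvSet2 (pvSet2 (pvSet2 (pvSet2 (pvSet2 _ 0 (n+0) 0) 0 (n+1) 0) 0 (n+2) 0)
      1 (n+0) 0) 1 (n+1) 0) 1 (n+2) 0).length = 2
    simp [set2_length]
  · intro o ho
    show ((pvSet2 (pvSet2 (pvSet2 (pvSet2 (pvSet2 (pvSet2 _ 0 (n+0) 0) 0 (n+1) 0) 0 (n+2) 0)
      1 (n+0) 0) 1 (n+1) 0) 1 (n+2) 0).getD o []).length = n + 3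
    simp only [set2_row_length]
    interval_cases o <;> simp [hlen]
  · intro o i ho hi
    rw [init_get hlen o i ho hi]
    split_ifs with h
    · right; rw [gdp_base h]
    · left; rfl
  · intro o i ho hni hi
    rw [init_get hlen o i ho hi, if_pos hni, gdp_base hni]
  · intro o i ho hii hne
    rw [init_get hlen o i ho (by omega), if_neg (by omega)] at hne
    exact absurd rfl hne

-- ===== VERDICT (by name: the statement is the Claim_ definition above) =====
theorem drivers_spec : Claim_equal_drivers := by
  intro P B _
  unfold Spec_drivers
  simp only [drivers, drivers_alt]
  rw [foldA_zc, foldB_c]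
  simp only [List.singleton_append, List.cons_append, List.length_cons]
  set S := pvSortP (pvDec P) with hS
  set n := (zsS S).length + 1 with hn
  set C := 0 :: (csS S 0 ++ [cntS S 0, cntS S 0, cntS S 0]) with hC
  have hlen : C.length = n + 3 := by
    simp [hC, hn, len_cs S 0]
  have hch : List.IsChain (· ≤ ·) C := cs_chain S 0
  have hg := gdp_nonneg hlen hch
  have hInit := init_inv (C := C) (n := n) hlen
  have hfa := fA_spec hlen hg (C.length + 1)
    ((List.range 2).foldl (fun F o => (List.range 3).foldl (fun F i => pvSet2 F o (n+i) 0) F)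
      [List.replicate C.length (-1), List.replicate C.length (-1)]) 0 0 hInit
    (by omega) (by omega) (by omega)
  have hfill := fillB_spec hg n le_rfl (List.replicate (n+3) 0) (List.replicate (n+3) 0)
    (by simp) (by simp)
    (fun i hmi hi => by
      constructor <;>
        · rw [List.getD_eq_getElem?_getD, List.getElem?_replicate, gdp_base hmi]
          simp [hi])
  exact tb_eq (C := C) (n := n) (-1 :: zsS S) hg hfa.1
    (fun i hi => hfill.2.2 i hi) (n+1) 0 0 [] (by omega)
    (fun _ => by rw [hfa.2.2.1]; have := hg 0 0; omega)
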